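-- pv_equiv track=rewrite | github.com/MetinSa/advent-of-code | 2021/14/main.py | get_initial_element_pair_count
-- ===== SOURCE A (Python) =====
-- from typing import Dict, List, Tuple
--
-- def get_initial_element_pair_count(
--     template: List[str], pair_insertions: Dict[str, str]
-- ) -> Dict[str, int]:
--
--     pair_counts = {pair: 0 for pair in pair_insertions}
--     for i in range(len(template) - 1):
--         pair = "".join([template[i], template[i + 1]])
--         if pair in pair_counts:
--             pair_counts[pair] += 1
--
--     return pair_counts
-- ===== SOURCE B (Python) =====
-- def get_initial_element_pair_count(template, pair_insertions):
--     # For each insertion key, count directly how many adjacent positions form it.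
--     return {p: sum(1 for a, b in zip(template, template[1:]) if a + b == p)
--             for p in pair_insertions}
-- ===== Notes on version B (the rewrite author's own statement) =====
-- stated objective: simpler
-- what changed: Inverts the loop nesting: instead of A's single indexed scan incrementing a zero-pre-seeded table, B is a one-expression comprehension that, for each insertion key, counts the adjacent positions forming that key.
import Mathlib
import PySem

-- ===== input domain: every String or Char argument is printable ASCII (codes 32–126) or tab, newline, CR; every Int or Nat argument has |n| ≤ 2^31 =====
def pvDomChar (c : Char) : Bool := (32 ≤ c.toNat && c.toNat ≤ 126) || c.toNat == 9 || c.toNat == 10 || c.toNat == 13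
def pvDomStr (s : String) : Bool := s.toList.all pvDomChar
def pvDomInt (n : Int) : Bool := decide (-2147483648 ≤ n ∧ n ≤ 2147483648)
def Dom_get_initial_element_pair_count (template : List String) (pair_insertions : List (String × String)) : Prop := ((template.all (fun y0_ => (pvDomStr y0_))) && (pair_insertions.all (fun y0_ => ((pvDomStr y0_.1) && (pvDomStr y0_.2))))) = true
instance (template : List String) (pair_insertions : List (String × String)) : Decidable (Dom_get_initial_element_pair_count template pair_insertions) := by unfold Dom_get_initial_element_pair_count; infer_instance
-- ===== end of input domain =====

-- B inverts the loop nesting: per insertion key it counts the matching adjacent positions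
-- directly (one comprehension), instead of A's single scan over a zero-pre-seeded table (simpler).

-- ===== PORT A =====
def get_initial_element_pair_count (template : List String) (pair_insertions : List (String × String)) : List (String × Int) :=
  -- pair_counts = {pair: 0 for pair in pair_insertions}
  let pair_counts : PySem.Dict String Int :=
    pair_insertions.foldl (fun d pair => d.insert pair.1 0) PySem.Dict.empty
  -- for i in range(len(template) - 1): pair = "".join([template[i], template[i+1]]); if pair in pair_counts: pair_counts[pair] += 1
  -- (indices i, i+1 are always in range, so pyGetD with an unused default is exact)
  let pair_counts :=
    (PySem.List.pyRange 0 (PySem.List.len template - 1) 1).foldl (fun d i =>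
      let pair := PySem.Str.join "" [PySem.List.pyGetD template i "", PySem.List.pyGetD template (i + 1) ""]
      if d.contains pair then d.modify pair 0 (· + 1) else d) pair_counts
  pair_counts.items

-- ===== PORT B =====
def get_initial_element_pair_count_alt (template : List String) (pair_insertions : List (String × String)) : List (String × Int) :=
  -- {p: sum(1 for a, b in zip(template, template[1:]) if a + b == p) for p in pair_insertions}
  (pair_insertions.foldl (fun d pair =>
      d.insert pair.1 ((template.zip (template.drop 1)).foldl
        (fun acc q => if q.1 ++ q.2 == pair.1 then acc + 1 else acc) (0 : Int)))
    (PySem.Dict.empty : PySem.Dict String Int)).items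

-- ===== PRECONDITION & SPEC =====
def Spec_get_initial_element_pair_count (template : List String) (pair_insertions : List (String × String)) (out : List (String × Int)) : Prop := out = get_initial_element_pair_count_alt template pair_insertions
instance (template : List String) (pair_insertions : List (String × String)) (out : List (String × Int)) : Decidable (Spec_get_initial_element_pair_count template pair_insertions out) := by unfold Spec_get_initial_element_pair_count; infer_instance

-- ===== CLAIM (what is proved, stated in full; the proofs are below) =====
def Claim_equal_get_initial_element_pair_count : Prop := ∀ (template : List String) (pair_insertions : List (String × String)), Dom_get_initial_element_pair_count template pair_insertions → Spec_get_initial_element_pair_count template pair_insertions (get_initial_element_pair_count template pair_insertions)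

-- ===== LEMMAS AND PROOFS =====

def pvBodyA (d : PySem.Dict String Int) (s : String) : PySem.Dict String Int :=
  if d.contains s then d.modify s 0 (· + 1) else d

theorem pv_join2 (a b : String) : PySem.Str.join "" [a, b] = a ++ b := by
  apply String.toList_injective
  simp [PySem.Str.join, PySem.Chars.join, List.intercalate, List.intersperse]

-- A's index scan produces exactly the adjacent-pair list obtained by zipping.
theorem pv_pairs_eq (template : List String) :
    (PySem.List.pyRange 0 (PySem.List.len template - 1) 1).map
      (fun i => PySem.Str.join "" [PySem.List.pyGetD template i "", PySem.List.pyGetD template (i + 1) ""])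
    = (template.zip (template.drop 1)).map (fun p => p.1 ++ p.2) := by
  apply List.ext_getElem
  · simp only [List.length_map, PySem.List.length_pyRange_one, PySem.List.len,
      List.length_zip, List.length_drop]
    omega
  · intro i h1 h2
    have hlen : i + 1 < template.length := by
      simp [PySem.List.length_pyRange_one, PySem.List.len] at h1
      omega
    simp only [List.getElem_map, PySem.List.getElem_pyRange_one, zero_add, pv_join2,
      List.getElem_zip, List.getElem_drop]
    have h1' : (i : Int) + 1 = ((i + 1 : Nat) : Int) := by push_cast; ring
    rw [h1', PySem.List.pyGetD_natCast, PySem.List.pyGetD_natCast,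
      List.getD_eq_getElem _ _ (by omega), List.getD_eq_getElem _ _ hlen]
    simp [Nat.add_comm]

theorem pv_loopA_keys (ps : List String) : ∀ d : PySem.Dict String Int,
    (ps.foldl pvBodyA d).keys = d.keys := by
  induction ps with
  | nil => intro d; rfl
  | cons s t ih =>
    intro d
    simp only [List.foldl_cons, pvBodyA]
    by_cases h : d.contains s
    · rw [if_pos h, ih, PySem.Dict.keys_modify, PySem.Dict.keys_insert_of_contains _ _ h]
    · rw [if_neg h, ih]

theorem pv_loopA_getD (k : String) (ps : List String) : ∀ d : PySem.Dict String Int,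
    (ps.foldl pvBodyA d).getD k 0
      = d.getD k 0 + (if d.contains k then (ps.count k : Int) else 0) := by
  induction ps with
  | nil => intro d; simp
  | cons s t ih =>
    intro d
    simp only [List.foldl_cons, pvBodyA]
    by_cases hs : d.contains s
    · rw [if_pos hs, ih]
      have hck : (d.modify s 0 (· + 1)).contains k = d.contains k := by
        rw [PySem.Dict.contains_modify]
        by_cases hks : k = s
        · subst hks; simp [hs]
        · simp [hks]
      rw [hck]
      by_cases hks : k = s
      · subst hks
        rw [PySem.Dict.getD_modify_self]
        simp only [hs, if_true, List.count_cons, BEq.rfl]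
        push_cast
        ring
      · rw [PySem.Dict.getD_modify_of_ne _ _ _ hks]
        have hbeq : (s == k) = false := beq_eq_false_iff_ne.mpr (Ne.symm hks)
        simp [List.count_cons, hbeq]
    · rw [if_neg hs, ih]
      by_cases hk : d.contains k
      · have hks : k ≠ s := fun h => hs (h ▸ hk)
        have hbeq : (s == k) = false := beq_eq_false_iff_ne.mpr (Ne.symm hks)
        simp [hk, List.count_cons, hbeq]
      · simp [hk]

theorem pv_zeros_getD (l : List (String × String)) : ∀ d : PySem.Dict String Int,
    (∀ k, d.getD k 0 = 0) →
    ∀ k, (l.foldl (fun d p => d.insert p.1 (0 : Int)) d).getD k 0 = 0 := by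
  induction l with
  | nil => intro d h k; exact h k
  | cons q t ih =>
    intro d h k
    refine ih _ (fun k' => ?_) k
    rw [PySem.Dict.getD_insert]
    split <;> simp [h]

-- B's inner fold is the count of k in the pair list.
theorem pv_count_fold (k : String) (l : List String) : ∀ acc : Int,
    l.foldl (fun acc x => if x == k then acc + 1 else acc) acc = acc + (l.count k : Int) := by
  induction l with
  | nil => intro acc; simp
  | cons s t ih =>
    intro acc
    simp only [List.foldl_cons, List.count_cons, ih]
    by_cases hs : s = k
    · subst hs
      simp only [BEq.rfl, if_true]
      push_cast
      ring
    · have hbeq : (s == k) = false := beq_eq_false_iff_ne.mpr hs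
      simp [hbeq]

-- getD after B's comprehension fold: last-write-wins, value depends only on the key.
theorem pv_proj_getD (g : String → Int) (l : List (String × String)) (k : String) :
    ∀ d : PySem.Dict String Int,
    (l.foldl (fun d p => d.insert p.1 (g p.1)) d).getD k 0
      = if k ∈ l.map (·.1) then g k else d.getD k 0 := by
  induction l with
  | nil => intro d; simp
  | cons q t ih =>
    intro d
    simp only [List.foldl_cons, ih, List.map_cons, List.mem_cons]
    by_cases ht : k ∈ t.map (·.1)
    · simp [ht]
    · by_cases hq : k = q.1
      · simp [hq]
      · simp [ht, hq, PySem.Dict.getD_insert]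

-- ===== VERDICT (by name: the statement is the Claim_ definition above) =====
theorem get_initial_element_pair_count_spec : Claim_equal_get_initial_element_pair_count := by
  intro template pair_insertions _
  unfold Spec_get_initial_element_pair_count
  simp only [get_initial_element_pair_count, get_initial_element_pair_count_alt]
  set d0 : PySem.Dict String Int :=
    pair_insertions.foldl (fun d pair => d.insert pair.1 0) PySem.Dict.empty with hd0
  set ps : List String := (template.zip (template.drop 1)).map (fun p => p.1 ++ p.2) with hps
  -- A's loop = fold of pvBodyA over ps
  have hAbody : (fun (d : PySem.Dict String Int) (i : Int) =>
      let pair := PySem.Str.join "" [PySem.List.pyGetD template i "", PySem.List.pyGetD template (i + 1) ""]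
      if d.contains pair then d.modify pair 0 (· + 1) else d)
    = fun d i => pvBodyA d (PySem.Str.join "" [PySem.List.pyGetD template i "", PySem.List.pyGetD template (i + 1) ""]) := rfl
  rw [hAbody, ← List.foldl_map, pv_pairs_eq, ← hps]
  -- B's per-key count, as a function of the key
  set g : String → Int := fun k => (template.zip (template.drop 1)).foldl
      (fun acc q => if q.1 ++ q.2 == k then acc + 1 else acc) (0 : Int) with hg
  have hgD : ∀ k : String, g k = (ps.count k : Int) := by
    intro k
    rw [hg]
    show (template.zip (template.drop 1)).foldl
        (fun acc q => if q.1 ++ q.2 == k then acc + 1 else acc) (0 : Int) = _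
    rw [← List.foldl_map (f := fun p : String × String => p.1 ++ p.2)
      (g := fun (acc : Int) (x : String) => if x == k then acc + 1 else acc),
      ← hps, pv_count_fold]
    simp
  set FA := ps.foldl pvBodyA d0 with hFA
  set FB := pair_insertions.foldl (fun d pair => d.insert pair.1 (g pair.1)) PySem.Dict.empty with hFB
  -- keys
  have hkd0 : d0.keys = PySem.Set.ofList (pair_insertions.map (·.1)) := by
    rw [hd0, PySem.Dict.keys_foldl_insert_key pair_insertions (·.1) (fun _ _ => (0 : Int))]
    simp [PySem.Set.update_nil_left]
  have hkA : FA.keys = PySem.Set.ofList (pair_insertions.map (·.1)) := by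
    rw [hFA, pv_loopA_keys, hkd0]
  have hkB : FB.keys = PySem.Set.ofList (pair_insertions.map (·.1)) := by
    rw [hFB, PySem.Dict.keys_foldl_insert_key pair_insertions (·.1) (fun _ p => g p.1)]
    simp [PySem.Set.update_nil_left]
  have hnA : FA.keys.Nodup := by rw [hkA]; exact PySem.Set.nodup_ofList _
  have hnB : FB.keys.Nodup := by rw [hkB]; exact PySem.Set.nodup_ofList _
  -- pointwise values
  rw [PySem.Dict.items_eq_map_keys FA hnA 0, PySem.Dict.items_eq_map_keys FB hnB 0, hkA, hkB]
  apply List.map_congr_left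
  intro k hk
  have hkmem : k ∈ pair_insertions.map (·.1) := (PySem.Set.mem_ofList _ _).mp hk
  have hcontains : d0.contains k := by
    rw [PySem.Dict.contains_iff_mem_keys, hkd0, PySem.Set.mem_ofList]
    exact hkmem
  have hA : FA.getD k 0 = (ps.count k : Int) := by
    rw [hFA, pv_loopA_getD, pv_zeros_getD pair_insertions PySem.Dict.empty (by simp) k]
    simp [hcontains]
  have hB : FB.getD k 0 = (ps.count k : Int) := by
    rw [hFB, pv_proj_getD, if_pos hkmem, hgD]
  rw [hA, hB]
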